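-- pv_equiv track=rewrite | github.com/longvuong1233/Final_PhanTich_TDTU | Source Code/Dynamic Programming/main.py | robotCoinCollection
-- ===== SOURCE A (Python) =====
-- def robotCoinCollection(C):
--     # Mục tiêu: Áp dụng kĩ thuật Dynamic Programming để tìm số lượng đồng xu nhiều nhất nhặt được
--     # tại vị trí n m khi đi từ vị trí (1,1). Và chỉ được di chuyển từ trên xuống hoặc trái qua phải.
--     # Input: Một mảng C 2 chiều có kích thước n x m, nếu tại vị trí (i,j) có đồng xu thì C[i][j] = 1, ngược lại = 0.
--     # Output: Số lượng đồng xu nhiều nhất có thể nhặt được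
--     F = [[0 for m in range(len(C[0]))] for n in range(len(C))]
--     F[0][0] = C[0][0]
--     for j in range(1, len(C[0])):
--         F[0][j] = F[0][j-1]+C[0][j]
--     for i in range(1, len(C)):
--         F[i][0] = F[i-1][0]+C[i][0]
--         for j in range(1, len(C[0])):
--             F[i][j] = max(F[i-1][j], F[i][j-1])+C[i][j]
--
--     return F[len(C)-1][len(C[0])-1]
-- ===== SOURCE B (Python) =====
-- def robotCoinCollection(C):
--     # Top-down memoized recursion: best(i, j) = max coins collectible on a
--     # down/right path from (0,0) to (i,j), cached in a dict; the answer is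
--     # best at the bottom-right corner. Demand-driven over predecessor cells
--     # instead of A's bottom-up row sweep over a full table.
--     memo = {}
--
--     def best(i, j):
--         if (i, j) not in memo:
--             if i == 0 and j == 0:
--                 v = C[0][0]
--             elif i == 0:
--                 v = best(0, j - 1) + C[0][j]
--             elif j == 0:
--                 v = best(i - 1, 0) + C[i][0]
--             else:
--                 v = max(best(i - 1, j), best(i, j - 1)) + C[i][j]
--             memo[(i, j)] = v
--         return memo[(i, j)]
--
--     return best(len(C) - 1, len(C[0]) - 1)
-- ===== Notes on version B (the rewrite author's own statement) =====
-- stated objective: alternative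
-- what changed: Replaces A's bottom-up fill of a full n x m table by nested index loops with a top-down memoized recursion best(i,j) over predecessor cells, cached in a dict and evaluated on demand from the bottom-right corner.
import Mathlib
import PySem

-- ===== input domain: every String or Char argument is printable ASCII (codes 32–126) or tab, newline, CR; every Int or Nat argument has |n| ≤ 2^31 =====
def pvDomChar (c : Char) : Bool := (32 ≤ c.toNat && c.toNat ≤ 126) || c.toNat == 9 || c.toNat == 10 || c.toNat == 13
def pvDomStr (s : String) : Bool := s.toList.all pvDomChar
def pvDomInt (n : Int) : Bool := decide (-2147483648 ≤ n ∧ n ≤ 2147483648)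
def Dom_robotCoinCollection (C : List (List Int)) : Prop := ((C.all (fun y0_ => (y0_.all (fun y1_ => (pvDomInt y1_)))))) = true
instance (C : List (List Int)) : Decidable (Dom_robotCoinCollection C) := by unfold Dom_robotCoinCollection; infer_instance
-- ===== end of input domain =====

-- B replaces A's bottom-up fill of a full n×m table (nested index loops) with a
-- top-down memoized recursion best(i,j) over predecessor cells, cached in a dict.

-- ===== PORT A =====
-- F[i][j] read / write (indices are always ≥ 0 in A; in range under Pre_)
def pvGet2 (F : List (List Int)) (i j : Int) : Int :=
  PySem.List.pyGetD (PySem.List.pyGetD F i []) j 0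

def pvSet2 (F : List (List Int)) (i j : Int) (v : Int) : List (List Int) :=
  PySem.List.pySetD F i (PySem.List.pySetD (PySem.List.pyGetD F i []) j v)

def robotCoinCollection (C : List (List Int)) : Int :=
  let n : Int := PySem.List.len C
  let m : Int := PySem.List.len (PySem.List.pyGetD C 0 [])
  -- F = [[0 for m in range(len(C[0]))] for n in range(len(C))]
  let F : List (List Int) :=
    (PySem.List.pyRange 0 n 1).map (fun _ => (PySem.List.pyRange 0 m 1).map (fun _ => (0 : Int)))
  -- F[0][0] = C[0][0]
  let F := pvSet2 F 0 0 (pvGet2 C 0 0)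
  -- for j in range(1, len(C[0])): F[0][j] = F[0][j-1] + C[0][j]
  let F := (PySem.List.pyRange 1 m 1).foldl
    (fun F j => pvSet2 F 0 j (pvGet2 F 0 (j - 1) + pvGet2 C 0 j)) F
  -- for i in range(1, len(C)): …
  let F := (PySem.List.pyRange 1 n 1).foldl
    (fun F i =>
      let F := pvSet2 F i 0 (pvGet2 F (i - 1) 0 + pvGet2 C i 0)
      (PySem.List.pyRange 1 m 1).foldl
        (fun F j => pvSet2 F i j (max (pvGet2 F (i - 1) j) (pvGet2 F i (j - 1)) + pvGet2 C i j)) F) F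
  pvGet2 F (n - 1) (m - 1)

-- ===== PORT B =====
-- C[i][j] at Nat indices (always in range under Pre_, where Python raises no IndexError)
def cellB (C : List (List Int)) (i j : Nat) : Int :=
  PySem.List.pyGetD (PySem.List.pyGetD C (i : Int) []) (j : Int) 0

-- def best(i, j): the memoized recursion, with the memo dict threaded through
def bestGo (C : List (List Int)) : Nat → Nat → PySem.Dict (Nat × Nat) Int →
    Int × PySem.Dict (Nat × Nat) Int
  | i, j, memo =>
    match memo.get? (i, j) with
    | some v => (v, memo)                      -- cache hit: return memo[(i, j)]
    | none =>
      let r : Int × PySem.Dict (Nat × Nat) Int :=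
        match i, j with
        | 0, 0 => (cellB C 0 0, memo)          -- v = C[0][0]
        | 0, j' + 1 =>                         -- v = best(0, j-1) + C[0][j]
          let p := bestGo C 0 j' memo
          (p.1 + cellB C 0 (j' + 1), p.2)
        | i' + 1, 0 =>                         -- v = best(i-1, 0) + C[i][0]
          let p := bestGo C i' 0 memo
          (p.1 + cellB C (i' + 1) 0, p.2)
        | i' + 1, j' + 1 =>                    -- v = max(best(i-1, j), best(i, j-1)) + C[i][j]
          let p := bestGo C i' (j' + 1) memo
          let q := bestGo C (i' + 1) j' p.2
          (max p.1 q.1 + cellB C (i' + 1) (j' + 1), q.2)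
      (r.1, r.2.insert (i, j) r.1)             -- memo[(i, j)] = v; return memo[(i, j)]
  termination_by i j _ => i + j

def robotCoinCollection_alt (C : List (List Int)) : Int :=
  -- return best(len(C) - 1, len(C[0]) - 1); the goal indices are ≥ 0 under Pre_
  (bestGo C (PySem.List.len C - 1).toNat
    (PySem.List.len (PySem.List.pyGetD C 0 []) - 1).toNat PySem.Dict.empty).1

-- ===== PRECONDITION & SPEC =====
-- A raises IndexError iff C is empty, its first row is empty, or some row is
-- shorter than the first row (it indexes every row up to len(C[0]) - 1).
def Pre_robotCoinCollection (C : List (List Int)) : Prop :=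
  C ≠ [] ∧ C.headD [] ≠ [] ∧ ∀ r ∈ C, (C.headD []).length ≤ r.length
instance (C : List (List Int)) : Decidable (Pre_robotCoinCollection C) := by
  unfold Pre_robotCoinCollection; infer_instance

def pvWitness_robotCoinCollection : List (List Int) := [[1, 0, 1], [0, 1, 1]]

def Spec_robotCoinCollection (C : List (List Int)) (out : Int) : Prop := out = robotCoinCollection_alt C
instance (C : List (List Int)) (out : Int) : Decidable (Spec_robotCoinCollection C out) := by unfold Spec_robotCoinCollection; infer_instance

-- ===== CLAIM (what is proved, stated in full; the proofs are below) =====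
def Claim_equal_robotCoinCollection : Prop := ∀ (C : List (List Int)), Dom_robotCoinCollection C → Pre_robotCoinCollection C → Spec_robotCoinCollection C (robotCoinCollection C)

-- ===== LEMMAS AND PROOFS =====

-- the common DP recurrence both programs compute, as a pure function of the cell values
def dfun (c : Nat → Nat → Int) : Nat → Nat → Int
  | 0, 0 => c 0 0
  | 0, j + 1 => dfun c 0 j + c 0 (j + 1)
  | i + 1, 0 => dfun c i 0 + c (i + 1) 0
  | i + 1, j + 1 => max (dfun c i (j + 1)) (dfun c (i + 1) j) + c (i + 1) (j + 1)
  termination_by i j => (i, j)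


-- cell values of the input grid at Nat indices (both proofs read C this way)
def pvC (C : List (List Int)) (i j : Nat) : Int := (C.getD i []).getD j 0

-- the A-side loop invariant's value function: rows < i complete, row i complete up to column k
def gA (c : Nat → Nat → Int) (i k i' j : Nat) : Int :=
  if i' < i ∨ (i' = i ∧ j < k) then dfun c i' j else 0

-- A's table invariant
def Ainv (n m : Nat) (g : Nat → Nat → Int) (F : List (List Int)) : Prop :=
  F.length = n ∧ (∀ r ∈ F, r.length = m) ∧ ∀ i' < n, ∀ j < m, (F.getD i' []).getD j 0 = g i' j

-- ---- generic list index facts ----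
lemma getD_set_nat (l : List Int) (i k : Nat) (v d : Int) (hi : i < l.length) :
    (l.set i v).getD k d = if k = i then v else l.getD k d := by
  rw [List.getD_eq_getElem?_getD, List.getD_eq_getElem?_getD]
  by_cases h : k = i
  · subst h; rw [List.getElem?_set_self hi]; simp
  · rw [List.getElem?_set_ne (by omega)]; simp [h]

lemma getD_set_row (l : List (List Int)) (i k : Nat) (v : List Int) (hi : i < l.length) :
    (l.set i v).getD k [] = if k = i then v else l.getD k [] := by
  rw [List.getD_eq_getElem?_getD, List.getD_eq_getElem?_getD]
  by_cases h : k = i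
  · subst h; rw [List.getElem?_set_self hi]; simp
  · rw [List.getElem?_set_ne (by omega)]; simp [h]

lemma getD_mem_row (l : List (List Int)) (i : Nat) (hi : i < l.length) : l.getD i [] ∈ l := by
  rw [List.getD_eq_getElem _ _ hi]; exact List.getElem_mem _

lemma headD_eq_getD (C : List (List Int)) : C.headD [] = C.getD 0 [] := by cases C <;> rfl

-- ---- pvGet2/pvSet2 at Nat-cast indices ----
lemma pvGet2_nat (F : List (List Int)) (i j : Nat) :
    pvGet2 F (i : Int) (j : Int) = (F.getD i []).getD j 0 := by
  simp [pvGet2]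

lemma pvSet2_nat (F : List (List Int)) (i j : Nat) (v : Int) :
    pvSet2 F (i : Int) (j : Int) v = F.set i ((F.getD i []).set j v) := by
  simp [pvSet2]

-- ---- A-side invariant machinery ----
lemma Ainv_congr {n m : Nat} {g g' : Nat → Nat → Int} {F : List (List Int)}
    (h : Ainv n m g F) (hg : ∀ i' < n, ∀ j < m, g i' j = g' i' j) : Ainv n m g' F := by
  obtain ⟨h1, h2, h3⟩ := h
  exact ⟨h1, h2, fun i' hi j hj => (h3 i' hi j hj).trans (hg i' hi j hj)⟩

lemma Ainv_set {n m : Nat} {g : Nat → Nat → Int} {F : List (List Int)}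
    (h : Ainv n m g F) (i j : Nat) (hi : i < n) (hj : j < m) (v : Int) :
    Ainv n m (fun i' j' => if i' = i ∧ j' = j then v else g i' j')
      (pvSet2 F (i : Int) (j : Int) v) := by
  obtain ⟨h1, h2, h3⟩ := h
  rw [pvSet2_nat]
  have hFl : i < F.length := by omega
  have hrow : (F.getD i []).length = m := h2 _ (getD_mem_row F i hFl)
  refine ⟨by simp [h1], ?_, ?_⟩
  · intro r hr
    rcases List.mem_or_eq_of_mem_set hr with hr | hr
    · exact h2 r hr
    · subst hr; rw [List.length_set]; exact hrow
  · intro i' hi' j' hj'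
    beta_reduce
    rw [getD_set_row _ _ _ _ hFl]
    by_cases hii : i' = i
    · subst hii
      rw [if_pos rfl, getD_set_nat _ _ _ _ _ (by rw [hrow]; omega)]
      by_cases hjj : j' = j
      · rw [if_pos hjj, if_pos ⟨rfl, hjj⟩]
      · rw [if_neg hjj, if_neg (fun hc => hjj hc.2)]
        exact h3 _ hi' _ hj'
    · rw [if_neg hii, if_neg (fun hc => hii hc.1)]
      exact h3 _ hi' _ hj'

-- dfun recurrences restated
lemma dfun_zero_succ (c : Nat → Nat → Int) (j : Nat) :
    dfun c 0 (j + 1) = dfun c 0 j + c 0 (j + 1) := by rw [dfun]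

lemma dfun_succ_zero (c : Nat → Nat → Int) (i : Nat) :
    dfun c (i + 1) 0 = dfun c i 0 + c (i + 1) 0 := by rw [dfun]

lemma dfun_succ_succ (c : Nat → Nat → Int) (i j : Nat) :
    dfun c (i + 1) (j + 1) = max (dfun c i (j + 1)) (dfun c (i + 1) j) + c (i + 1) (j + 1) := by
  rw [dfun]

lemma pvGet2_0nat (F : List (List Int)) (j : Nat) :
    pvGet2 F 0 (j : Int) = (F.getD 0 []).getD j 0 := by
  simp [pvGet2, PySem.List.pyGetD_zero]

lemma pvGet2_nat0 (F : List (List Int)) (i : Nat) :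
    pvGet2 F (i : Int) 0 = (F.getD i []).getD 0 0 := by
  simp [pvGet2, PySem.List.pyGetD_zero]

lemma pvGet2_00 (F : List (List Int)) : pvGet2 F 0 0 = (F.getD 0 []).getD 0 0 := by
  simp [pvGet2, PySem.List.pyGetD_zero]

lemma dfun_zero_zero (c : Nat → Nat → Int) : dfun c 0 0 = c 0 0 := by rw [dfun]

lemma gA_zero (c : Nat → Nat → Int) (i' j : Nat) : gA c 0 0 i' j = 0 := by
  unfold gA; rw [if_neg (by omega)]

lemma gA_dfun (c : Nat → Nat → Int) (i k i' j : Nat) (h : i' < i ∨ (i' = i ∧ j < k)) :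
    gA c i k i' j = dfun c i' j := by
  unfold gA; rw [if_pos h]

lemma gA_update (c : Nat → Nat → Int) (i k i' j : Nat) (v : Int) (hv : v = dfun c i k) :
    (if i' = i ∧ j = k then v else gA c i k i' j) = gA c i (k + 1) i' j := by
  subst hv
  by_cases h : i' = i ∧ j = k
  · obtain ⟨rfl, rfl⟩ := h
    rw [if_pos ⟨rfl, rfl⟩]
    unfold gA
    rw [if_pos (Or.inr ⟨rfl, by omega⟩)]
  · rw [if_neg h]
    unfold gA
    split_ifs with h1 h2
    · rfl
    · exfalso; omega
    · exfalso; omega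
    · rfl

lemma gA_roll (c : Nat → Nat → Int) (i m i' j : Nat) (hj : j < m) :
    gA c i m i' j = gA c (i + 1) 0 i' j := by
  unfold gA
  split_ifs with h1 h2
  · rfl
  · exfalso; omega
  · exfalso; omega
  · rfl

lemma Ainv_of_zero {n m : Nat} (c : Nat → Nat → Int) (F : List (List Int)) (hl : F.length = n)
    (hrows : ∀ r ∈ F, r.length = m) (hz : ∀ r ∈ F, ∀ x ∈ r, x = 0) :
    Ainv n m (gA c 0 0) F := by
  refine ⟨hl, hrows, ?_⟩
  intro i hi j hj
  rw [gA_zero]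
  have hmem : F.getD i [] ∈ F := getD_mem_row F i (by omega)
  by_cases hjr : j < (F.getD i []).length
  · rw [List.getD_eq_getElem _ _ hjr]
    exact hz _ hmem _ (List.getElem_mem _)
  · rw [List.getD_eq_default _ _ (by omega)]

-- one step of the first-row j-loop
lemma step0 (C : List (List Int)) (n m : Nat) (hn : 1 ≤ n) (t : Nat) (htm : 1 + t < m)
    (F' : List (List Int)) (inv : Ainv n m (gA (pvC C) 0 (1 + t)) F') :
    Ainv n m (gA (pvC C) 0 (1 + (t + 1)))
      (pvSet2 F' 0 (1 + (t : Int)) (pvGet2 F' 0 (1 + (t : Int) - 1) + pvGet2 C 0 (1 + (t : Int)))) := by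
  have e2 : (1 + (t : Int) - 1) = ((t : Nat) : Int) := by ring
  have e1 : (1 + (t : Int)) = ((t + 1 : Nat) : Int) := by push_cast; ring
  rw [e2, e1]
  have hval : pvGet2 F' 0 ((t : Nat) : Int) + pvGet2 C 0 ((t + 1 : Nat) : Int) =
      dfun (pvC C) 0 (t + 1) := by
    rw [pvGet2_0nat, pvGet2_0nat, inv.2.2 0 (by omega) t (by omega),
      gA_dfun _ _ _ _ _ (by omega), dfun_zero_succ]
    rfl
  rw [hval]
  have hset := Ainv_set inv 0 (t + 1) (by omega) (by omega) (dfun (pvC C) 0 (t + 1))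
  simp only [Nat.cast_zero] at hset
  rw [show (1 : Nat) + t = t + 1 from by omega] at hset
  rw [show (1 : Nat) + (t + 1) = (t + 1) + 1 from by omega]
  exact Ainv_congr hset (fun i' _ j _ => gA_update (pvC C) 0 (t + 1) i' j _ rfl)

-- the first-row j-loop of A
lemma rowloop0 (C : List (List Int)) (n m : Nat) (hn : 1 ≤ n) (F : List (List Int))
    (hF : Ainv n m (gA (pvC C) 0 1) F) :
    ∀ t, 1 + t ≤ m → Ainv n m (gA (pvC C) 0 (1 + t))
      ((List.range t).foldl
        (fun F (k : Nat) => pvSet2 F 0 (1 + (k : Int))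
          (pvGet2 F 0 (1 + (k : Int) - 1) + pvGet2 C 0 (1 + (k : Int)))) F) := by
  intro t
  induction t with
  | zero => intro _; exact hF
  | succ t ih =>
    intro ht
    rw [List.range_succ, List.foldl_append, List.foldl_cons, List.foldl_nil]
    exact step0 C n m hn t (by omega) _ (ih (by omega))

-- one step of the j-loop of a later row i+1
lemma stepI (C : List (List Int)) (n m : Nat) (i : Nat) (hin : i + 1 < n) (t : Nat)
    (htm : 1 + t < m) (F' : List (List Int)) (inv : Ainv n m (gA (pvC C) (i + 1) (1 + t)) F') :
    Ainv n m (gA (pvC C) (i + 1) (1 + (t + 1)))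
      (pvSet2 F' ((i + 1 : Nat) : Int) (1 + (t : Int))
        (max (pvGet2 F' ((i : Nat) : Int) (1 + (t : Int)))
             (pvGet2 F' ((i + 1 : Nat) : Int) (1 + (t : Int) - 1)) +
          pvGet2 C ((i + 1 : Nat) : Int) (1 + (t : Int)))) := by
  have e2 : (1 + (t : Int) - 1) = ((t : Nat) : Int) := by ring
  have e1 : (1 + (t : Int)) = ((t + 1 : Nat) : Int) := by push_cast; ring
  rw [e2, e1]
  have hval : max (pvGet2 F' ((i : Nat) : Int) ((t + 1 : Nat) : Int))
        (pvGet2 F' ((i + 1 : Nat) : Int) ((t : Nat) : Int)) +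
      pvGet2 C ((i + 1 : Nat) : Int) ((t + 1 : Nat) : Int) = dfun (pvC C) (i + 1) (t + 1) := by
    rw [pvGet2_nat, pvGet2_nat, pvGet2_nat, inv.2.2 i (by omega) (t + 1) (by omega),
      inv.2.2 (i + 1) (by omega) t (by omega), gA_dfun _ _ _ _ _ (by omega),
      gA_dfun _ _ _ _ _ (by omega), dfun_succ_succ]
    rfl
  rw [hval]
  have hset := Ainv_set inv (i + 1) (t + 1) (by omega) (by omega) (dfun (pvC C) (i + 1) (t + 1))
  rw [show (1 : Nat) + t = t + 1 from by omega] at hset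
  rw [show (1 : Nat) + (t + 1) = (t + 1) + 1 from by omega]
  exact Ainv_congr hset (fun i' _ j _ => gA_update (pvC C) (i + 1) (t + 1) i' j _ rfl)

-- the j-loop of a later row i+1
lemma rowloopI (C : List (List Int)) (n m : Nat) (i : Nat) (hin : i + 1 < n)
    (F : List (List Int)) (hF : Ainv n m (gA (pvC C) (i + 1) 1) F) :
    ∀ t, 1 + t ≤ m → Ainv n m (gA (pvC C) (i + 1) (1 + t))
      ((List.range t).foldl
        (fun F (k : Nat) => pvSet2 F ((i + 1 : Nat) : Int) (1 + (k : Int))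
          (max (pvGet2 F ((i : Nat) : Int) (1 + (k : Int)))
               (pvGet2 F ((i + 1 : Nat) : Int) (1 + (k : Int) - 1)) +
            pvGet2 C ((i + 1 : Nat) : Int) (1 + (k : Int)))) F) := by
  intro t
  induction t with
  | zero => intro _; exact hF
  | succ t ih =>
    intro ht
    rw [List.range_succ, List.foldl_append, List.foldl_cons, List.foldl_nil]
    exact stepI C n m i hin t (by omega) _ (ih (by omega))

-- one iteration of the outer i-loop
lemma stepOuter (C : List (List Int)) (n m : Nat) (hm : 1 ≤ m) (t : Nat) (htn : t + 1 < n)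
    (F' : List (List Int)) (inv : Ainv n m (gA (pvC C) t m) F') :
    Ainv n m (gA (pvC C) (t + 1) m)
      ((List.range (m - 1)).foldl
        (fun F (k : Nat) => pvSet2 F (1 + (t : Int)) (1 + (k : Int))
          (max (pvGet2 F (1 + (t : Int) - 1) (1 + (k : Int)))
               (pvGet2 F (1 + (t : Int)) (1 + (k : Int) - 1)) +
            pvGet2 C (1 + (t : Int)) (1 + (k : Int))))
        (pvSet2 F' (1 + (t : Int)) 0 (pvGet2 F' (1 + (t : Int) - 1) 0 + pvGet2 C (1 + (t : Int)) 0))) := by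
  have e4 : (1 + (t : Int) - 1) = ((t : Nat) : Int) := by ring
  have e3 : (1 + (t : Int)) = ((t + 1 : Nat) : Int) := by push_cast; ring
  rw [e4, e3]
  have inv0 : Ainv n m (gA (pvC C) (t + 1) 0) F' :=
    Ainv_congr inv (fun i' _ j hj => gA_roll (pvC C) t m i' j hj)
  have hval : pvGet2 F' ((t : Nat) : Int) 0 + pvGet2 C ((t + 1 : Nat) : Int) 0 =
      dfun (pvC C) (t + 1) 0 := by
    rw [pvGet2_nat0, pvGet2_nat0, inv0.2.2 t (by omega) 0 (by omega),
      gA_dfun _ _ _ _ _ (by omega), dfun_succ_zero]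
    rfl
  rw [hval]
  have hset := Ainv_set inv0 (t + 1) 0 (by omega) (by omega) (dfun (pvC C) (t + 1) 0)
  simp only [Nat.cast_zero] at hset
  have hstart : Ainv n m (gA (pvC C) (t + 1) 1) (pvSet2 F' ((t + 1 : Nat) : Int) 0 (dfun (pvC C) (t + 1) 0)) :=
    Ainv_congr hset (fun i' _ j _ => gA_update (pvC C) (t + 1) 0 i' j _ rfl)
  have := rowloopI C n m t htn _ hstart (m - 1) (by omega)
  rw [show (1 : Nat) + (m - 1) = m from by omega] at this
  exact this

-- the outer i-loop of A
lemma outerloop (C : List (List Int)) (n m : Nat) (hm : 1 ≤ m) (F : List (List Int))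
    (hF : Ainv n m (gA (pvC C) 0 m) F) :
    ∀ t, t + 1 ≤ n → Ainv n m (gA (pvC C) t m)
      ((List.range t).foldl
        (fun F (k : Nat) =>
          (List.range (m - 1)).foldl
            (fun F (j : Nat) => pvSet2 F (1 + (k : Int)) (1 + (j : Int))
              (max (pvGet2 F (1 + (k : Int) - 1) (1 + (j : Int)))
                   (pvGet2 F (1 + (k : Int)) (1 + (j : Int) - 1)) +
                pvGet2 C (1 + (k : Int)) (1 + (j : Int))))
            (pvSet2 F (1 + (k : Int)) 0 (pvGet2 F (1 + (k : Int) - 1) 0 + pvGet2 C (1 + (k : Int)) 0))) F) := by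
  intro t
  induction t with
  | zero => intro _; exact hF
  | succ t ih =>
    intro ht
    rw [List.range_succ, List.foldl_append, List.foldl_cons, List.foldl_nil]
    exact stepOuter C n m hm t (by omega) _ (ih (by omega))

-- A's whole computation equals the pure DP value at the last cell
lemma A_eq_dfun (C : List (List Int)) (h : Pre_robotCoinCollection C) :
    robotCoinCollection C = dfun (pvC C) (C.length - 1) ((C.headD []).length - 1) := by
  obtain ⟨hne, hrow0, _⟩ := h
  have hn : 1 ≤ C.length := List.length_pos_iff.2 hne
  rw [headD_eq_getD] at hrow0 ⊢
  have hm : 1 ≤ (C.getD 0 []).length := List.length_pos_iff.2 hrow0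
  unfold robotCoinCollection
  simp only [PySem.List.len_eq, PySem.List.pyGetD_zero, PySem.List.pyRange_one,
    List.foldl_map, List.map_map]
  rw [show ((C.length : Int) - 1).toNat = C.length - 1 from by omega,
    show (((C.getD 0 []).length : Int) - 1).toNat = (C.getD 0 []).length - 1 from by omega,
    show ((C.length : Int) - 0).toNat = C.length from by omega,
    show (((C.getD 0 []).length : Int) - 0).toNat = (C.getD 0 []).length from by omega]
  have hinit : Ainv C.length (C.getD 0 []).length (gA (pvC C) 0 0)
      (List.map ((fun _ => List.map ((fun _ => (0 : Int)) ∘ fun (k : Nat) => (0 : Int) + (k : Int))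
          (List.range (C.getD 0 []).length)) ∘ fun (k : Nat) => (0 : Int) + (k : Int))
        (List.range C.length)) := by
    refine Ainv_of_zero _ _ (by simp) ?_ ?_
    · intro r hr
      simp only [List.mem_map] at hr
      obtain ⟨a, _, rfl⟩ := hr
      simp
    · intro r hr x hx
      simp only [List.mem_map] at hr
      obtain ⟨a, _, rfl⟩ := hr
      simp only [Function.comp, List.mem_map] at hx
      obtain ⟨b, _, rfl⟩ := hx
      rfl
  have hv00 : pvGet2 C 0 0 = dfun (pvC C) 0 0 := by
    rw [pvGet2_00, dfun_zero_zero]; rfl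
  have hset00 := Ainv_set hinit 0 0 (by omega) (by omega) (pvGet2 C 0 0)
  simp only [Nat.cast_zero] at hset00
  have hg1 := Ainv_congr hset00 (fun i' _ j _ => gA_update (pvC C) 0 0 i' j _ hv00)
  have hrow := rowloop0 C C.length (C.getD 0 []).length hn _ hg1
    ((C.getD 0 []).length - 1) (by omega)
  rw [show 1 + ((C.getD 0 []).length - 1) = (C.getD 0 []).length from by omega] at hrow
  have houter := outerloop C C.length (C.getD 0 []).length hm _ hrow (C.length - 1) (by omega)
  rw [show (C.length : Int) - 1 = ((C.length - 1 : Nat) : Int) from by omega,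
    show ((C.getD 0 []).length : Int) - 1 = (((C.getD 0 []).length - 1 : Nat) : Int) from by omega,
    pvGet2_nat, houter.2.2 (C.length - 1) (by omega) ((C.getD 0 []).length - 1) (by omega),
    gA_dfun _ _ _ _ _ (by omega)]

-- ---- B-side lemmas ----
lemma cellB_eq (C : List (List Int)) (i j : Nat) : cellB C i j = pvC C i j := by
  simp [cellB, pvC]

-- a memo is good when every cached value is the DP value of its cell
def GoodMemo (C : List (List Int)) (memo : PySem.Dict (Nat × Nat) Int) : Prop :=
  ∀ i j v, memo.get? (i, j) = some v → v = dfun (pvC C) i j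

lemma goodMemo_empty (C : List (List Int)) : GoodMemo C PySem.Dict.empty := by
  intro i j v h
  rw [PySem.Dict.get?_empty] at h
  exact absurd h (by simp)

lemma goodMemo_insert (C : List (List Int)) (memo : PySem.Dict (Nat × Nat) Int)
    (h : GoodMemo C memo) (i j : Nat) (v : Int) (hv : v = dfun (pvC C) i j) :
    GoodMemo C (memo.insert (i, j) v) := by
  intro i' j' w hw
  rw [PySem.Dict.get?_insert] at hw
  by_cases he : (i', j') = ((i, j) : Nat × Nat)
  · rw [if_pos he] at hw
    injection he with h1 h2
    subst h1; subst h2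
    injection hw with h3
    exact h3 ▸ hv
  · rw [if_neg he] at hw
    exact h i' j' w hw

-- unfolding equations for bestGo: cache hit and cache miss
lemma bestGo_hit (C : List (List Int)) (i j : Nat) (memo : PySem.Dict (Nat × Nat) Int) (v : Int)
    (h : memo.get? (i, j) = some v) : bestGo C i j memo = (v, memo) := by
  rw [bestGo.eq_def]; simp only [h]

lemma bestGo_miss (C : List (List Int)) (i j : Nat) (memo : PySem.Dict (Nat × Nat) Int)
    (h : memo.get? (i, j) = none) : bestGo C i j memo =
      (let r : Int × PySem.Dict (Nat × Nat) Int :=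
        match i, j with
        | 0, 0 => (cellB C 0 0, memo)
        | 0, j' + 1 =>
          let p := bestGo C 0 j' memo
          (p.1 + cellB C 0 (j' + 1), p.2)
        | i' + 1, 0 =>
          let p := bestGo C i' 0 memo
          (p.1 + cellB C (i' + 1) 0, p.2)
        | i' + 1, j' + 1 =>
          let p := bestGo C i' (j' + 1) memo
          let q := bestGo C (i' + 1) j' p.2
          (max p.1 q.1 + cellB C (i' + 1) (j' + 1), q.2)
      (r.1, r.2.insert (i, j) r.1)) := by
  rw [bestGo.eq_def]; simp only [h]
  rcases i with _|i' <;> rcases j with _|j' <;> rfl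

-- the memoized recursion computes the DP value and keeps the memo good
lemma bestGo_correct (C : List (List Int)) :
    ∀ (k i j : Nat) (memo : PySem.Dict (Nat × Nat) Int), i + j ≤ k → GoodMemo C memo →
      (bestGo C i j memo).1 = dfun (pvC C) i j ∧ GoodMemo C (bestGo C i j memo).2 := by
  intro k
  induction k with
  | zero =>
    intro i j memo hk hg
    have hi : i = 0 := by omega
    have hj : j = 0 := by omega
    subst hi; subst hj
    cases hcache : PySem.Dict.get? memo (0, 0) with
    | some v =>
      rw [bestGo_hit C 0 0 memo v hcache]
      exact ⟨hg 0 0 v hcache, hg⟩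
    | none =>
      rw [bestGo_miss C 0 0 memo hcache]
      have hv : cellB C 0 0 = dfun (pvC C) 0 0 := by rw [cellB_eq, dfun_zero_zero]
      exact ⟨hv, goodMemo_insert C memo hg 0 0 _ hv⟩
  | succ k ih =>
    intro i j memo hk hg
    cases hcache : PySem.Dict.get? memo (i, j) with
    | some v =>
      rw [bestGo_hit C i j memo v hcache]
      exact ⟨hg i j v hcache, hg⟩
    | none =>
      match i, j with
      | 0, 0 =>
        rw [bestGo_miss C 0 0 memo hcache]
        have hv : cellB C 0 0 = dfun (pvC C) 0 0 := by rw [cellB_eq, dfun_zero_zero]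
        exact ⟨hv, goodMemo_insert C memo hg 0 0 _ hv⟩
      | 0, j' + 1 =>
        rw [bestGo_miss C 0 (j' + 1) memo hcache]
        obtain ⟨h1, h2⟩ := ih 0 j' memo (by omega) hg
        have hv : (bestGo C 0 j' memo).1 + cellB C 0 (j' + 1) = dfun (pvC C) 0 (j' + 1) := by
          rw [h1, cellB_eq, dfun_zero_succ]
        exact ⟨hv, goodMemo_insert C _ h2 0 (j' + 1) _ hv⟩
      | i' + 1, 0 =>
        rw [bestGo_miss C (i' + 1) 0 memo hcache]
        obtain ⟨h1, h2⟩ := ih i' 0 memo (by omega) hg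
        have hv : (bestGo C i' 0 memo).1 + cellB C (i' + 1) 0 = dfun (pvC C) (i' + 1) 0 := by
          rw [h1, cellB_eq, dfun_succ_zero]
        exact ⟨hv, goodMemo_insert C _ h2 (i' + 1) 0 _ hv⟩
      | i' + 1, j' + 1 =>
        rw [bestGo_miss C (i' + 1) (j' + 1) memo hcache]
        obtain ⟨h1, h2⟩ := ih i' (j' + 1) memo (by omega) hg
        obtain ⟨h3, h4⟩ := ih (i' + 1) j' (bestGo C i' (j' + 1) memo).2 (by omega) h2
        have hv : max (bestGo C i' (j' + 1) memo).1
            (bestGo C (i' + 1) j' (bestGo C i' (j' + 1) memo).2).1 + cellB C (i' + 1) (j' + 1) =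
            dfun (pvC C) (i' + 1) (j' + 1) := by
          rw [h1, h3, cellB_eq, dfun_succ_succ]
        exact ⟨hv, goodMemo_insert C _ h4 (i' + 1) (j' + 1) _ hv⟩

-- B's whole computation equals the pure DP value at the last cell
lemma B_eq_dfun (C : List (List Int)) (h : Pre_robotCoinCollection C) :
    robotCoinCollection_alt C = dfun (pvC C) (C.length - 1) ((C.headD []).length - 1) := by
  obtain ⟨hne, hrow0, _⟩ := h
  have hn : 1 ≤ C.length := List.length_pos_iff.2 hne
  rw [headD_eq_getD] at hrow0 ⊢
  have hm : 1 ≤ (C.getD 0 []).length := List.length_pos_iff.2 hrow0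
  unfold robotCoinCollection_alt
  rw [PySem.List.pyGetD_zero]
  simp only [PySem.List.len_eq]
  rw [show ((C.length : Int) - 1).toNat = C.length - 1 from by omega,
    show (((C.getD 0 []).length : Int) - 1).toNat = (C.getD 0 []).length - 1 from by omega]
  exact (bestGo_correct C (C.length - 1 + ((C.getD 0 []).length - 1)) _ _ _ le_rfl
    (goodMemo_empty C)).1

-- ===== VERDICT (by name: the statement is the Claim_ definition above) =====
theorem robotCoinCollection_spec : Claim_equal_robotCoinCollection := by
  intro C _ hpre
  unfold Spec_robotCoinCollection
  rw [A_eq_dfun C hpre, B_eq_dfun C hpre]
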